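-- pv_equiv track=rewrite | github.com/MarielaCarlita/M | codigo2.py | is_boundary
-- ===== SOURCE A (Python) =====
-- def is_boundary(possible_boundary, simplex):
--     if len(possible_boundary) +1 != len(simplex):
--         return False
--     extra = 0
--     for k in range (len(possible_boundary)):
--         if possible_boundary[k] == simplex[k+extra]:
--             continue
--         if extra == 0 and possible_boundary[k] == simplex[k+1]:
--             extra = 1
--             continue
--         return False
--     return True
-- ===== SOURCE B (Python) =====
-- def is_boundary(possible_boundary, simplex):
--     if len(possible_boundary) + 1 != len(simplex):
--         return False
--     i = 0
--     while i < len(possible_boundary) and possible_boundary[i] == simplex[i]: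
--         i += 1
--     return list(possible_boundary[i:]) == list(simplex[i + 1:])
-- ===== Notes on version B (the rewrite author's own statement) =====
-- stated objective: simpler
-- what changed: Replaces A's skip-flag state machine over indices by a prefix scan to the first mismatch followed by a direct suffix slice comparison.
import Mathlib
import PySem

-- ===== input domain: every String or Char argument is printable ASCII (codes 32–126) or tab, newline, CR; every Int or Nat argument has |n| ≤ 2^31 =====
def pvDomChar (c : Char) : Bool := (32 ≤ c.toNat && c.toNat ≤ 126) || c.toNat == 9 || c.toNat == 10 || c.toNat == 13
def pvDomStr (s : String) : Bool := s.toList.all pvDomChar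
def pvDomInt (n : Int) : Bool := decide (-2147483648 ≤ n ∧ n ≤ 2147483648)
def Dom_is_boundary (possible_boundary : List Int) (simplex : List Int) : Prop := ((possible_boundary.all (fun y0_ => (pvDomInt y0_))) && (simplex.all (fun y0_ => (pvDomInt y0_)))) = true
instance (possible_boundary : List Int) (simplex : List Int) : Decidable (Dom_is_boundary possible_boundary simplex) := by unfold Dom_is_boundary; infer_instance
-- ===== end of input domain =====

-- B replaces A's skip-flag state machine with a prefix scan to the first mismatch plus a suffix comparison (objective: simpler); same cost, not claimed faster.


-- ===== PORT A =====
-- loop of A: k runs over range(len(pb)); 'extra' is the skip flag; early 'return False' = false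
def isbGoA (pb s : List Int) (k extra : Nat) : Bool :=
  if k < pb.length then
    if pb.getD k 0 = s.getD (k + extra) 0 then isbGoA pb s (k + 1) extra
    else if extra = 0 ∧ pb.getD k 0 = s.getD (k + 1) 0 then isbGoA pb s (k + 1) 1
    else false
  else true
termination_by pb.length - k

def is_boundary (possible_boundary : List Int) (simplex : List Int) : Bool :=
  if possible_boundary.length + 1 ≠ simplex.length then false
  else isbGoA possible_boundary simplex 0 0

-- ===== PORT B =====
-- B's while loop: first index where the prefixes disagree
def isbScan (pb s : List Int) (i : Nat) : Nat :=
  if i < pb.length ∧ pb.getD i 0 = s.getD i 0 then isbScan pb s (i + 1) else i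
termination_by pb.length - i

def is_boundary_alt (possible_boundary : List Int) (simplex : List Int) : Bool :=
  if possible_boundary.length + 1 ≠ simplex.length then false
  else
    let i := isbScan possible_boundary simplex 0
    decide (possible_boundary.drop i = simplex.drop (i + 1))

-- ===== PRECONDITION & SPEC =====
def Spec_is_boundary (possible_boundary : List Int) (simplex : List Int) (out : Bool) : Prop := out = is_boundary_alt possible_boundary simplex
instance (possible_boundary : List Int) (simplex : List Int) (out : Bool) : Decidable (Spec_is_boundary possible_boundary simplex out) := by unfold Spec_is_boundary; infer_instance

-- ===== CLAIM (what is proved, stated in full; the proofs are below) =====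
def Claim_equal_is_boundary : Prop := ∀ (possible_boundary : List Int) (simplex : List Int), Dom_is_boundary possible_boundary simplex → Spec_is_boundary possible_boundary simplex (is_boundary possible_boundary simplex)

-- ===== LEMMAS AND PROOFS =====

-- ===== VERDICT (by name: the statement is the Claim_ definition above) =====
-- indices in range: getD agrees with getElem
theorem isb_drop_cons (xs : List Int) (k : Nat) (h : k < xs.length) :
    xs.drop k = xs.getD k 0 :: xs.drop (k + 1) := by
  rw [List.getD_eq_getElem xs 0 h]
  exact (List.getElem_cons_drop h).symm

-- extra = 1 phase of A equals a straight suffix comparison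
theorem isbGoA_one (pb s : List Int) (k : Nat) (hlen : pb.length + 1 = s.length) :
    isbGoA pb s k 1 = decide (pb.drop k = s.drop (k + 1)) := by
  by_cases hk : k < pb.length
  · have hs : k + 1 < s.length := by omega
    rw [isbGoA, if_pos hk, isb_drop_cons pb k hk, isb_drop_cons s (k+1) hs]
    by_cases he : pb.getD k 0 = s.getD (k + 1) 0
    · rw [if_pos he, isbGoA_one pb s (k+1) hlen]
      simp only [List.cons.injEq, he, true_and]
    · rw [if_neg he, if_neg (fun h => he h.2)]
      have hne : ¬ (pb.getD k 0 :: pb.drop (k+1) = s.getD (k+1) 0 :: s.drop (k+1+1)) := by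
        intro h; exact he (List.cons.injEq .. ▸ h).1
      rw [decide_eq_false hne]
  · rw [isbGoA, if_neg hk,
      List.drop_eq_nil_of_le (as := pb) (by omega),
      List.drop_eq_nil_of_le (as := s) (by omega)]
    simp
termination_by pb.length - k

-- extra = 0 phase of A equals B's scan-then-compare
theorem isbGoA_zero (pb s : List Int) (k : Nat) (hlen : pb.length + 1 = s.length) :
    isbGoA pb s k 0 =
      decide (pb.drop (isbScan pb s k) = s.drop (isbScan pb s k + 1)) := by
  by_cases hk : k < pb.length
  · by_cases he : pb.getD k 0 = s.getD k 0
    · have hS : isbScan pb s k = isbScan pb s (k+1) := by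
        rw [isbScan, if_pos ⟨hk, he⟩]
      have hA : isbGoA pb s k 0 = isbGoA pb s (k+1) 0 := by
        rw [isbGoA, if_pos hk, if_pos (show pb.getD k 0 = s.getD (k+0) 0 from he)]
      rw [hA, hS]
      exact isbGoA_zero pb s (k+1) hlen
    · have hS : isbScan pb s k = k := by
        rw [isbScan, if_neg (fun h => he h.2)]
      have hs : k + 1 < s.length := by omega
      rw [hS, isbGoA, if_pos hk,
        if_neg (show ¬ pb.getD k 0 = s.getD (k+0) 0 from he),
        isb_drop_cons pb k hk, isb_drop_cons s (k+1) hs]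
      by_cases h1 : pb.getD k 0 = s.getD (k + 1) 0
      · rw [if_pos (And.intro rfl h1), isbGoA_one pb s (k+1) hlen]
        simp only [List.cons.injEq, h1, true_and]
      · rw [if_neg (fun h => h1 h.2)]
        have hne : ¬ (pb.getD k 0 :: pb.drop (k+1) = s.getD (k+1) 0 :: s.drop (k+1+1)) := by
          intro h; exact h1 (List.cons.injEq .. ▸ h).1
        rw [decide_eq_false hne]
  · have hS : isbScan pb s k = k := by
      rw [isbScan, if_neg (fun h => hk h.1)]
    rw [hS, isbGoA, if_neg hk,
      List.drop_eq_nil_of_le (as := pb) (by omega),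
      List.drop_eq_nil_of_le (as := s) (by omega)]
    simp
termination_by pb.length - k

-- ===== VERDICT (by name: the statement is the Claim_ definition above) =====
theorem is_boundary_spec : Claim_equal_is_boundary := by
  intro pb s _
  unfold Spec_is_boundary is_boundary is_boundary_alt
  by_cases hlen : pb.length + 1 ≠ s.length
  · simp [hlen]
  · rw [not_not] at hlen
    simp only [hlen, ne_eq, not_true_eq_false, if_false]
    exact isbGoA_zero pb s 0 hlen
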